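-- pv_equiv track=rewrite | github.com/XanderDJ/Twitch_ChatBot | twitchchat/chat.py | count_os
-- ===== SOURCE A (Python) =====
-- def count_os(string):
--     count = 0
--     max_count = 0
--     prev_char = ""
--     for char in string:
--         if prev_char == "y" and char.lower() == "o":
--             count += 1
--         elif char.lower() == "o" and prev_char == "o" and count > 0:
--             count += 1
--         else:
--             if count > max_count:
--                 max_count = count
--             count = 0
--         prev_char = char.lower()
--
--     if count > max_count:
--         max_count = count
--     return max_count
-- ===== SOURCE B (Python) =====
-- import re
--
-- def count_os(string):
--     return max((len(m) - 1 for m in re.findall(r'[yY][oO]+', string)), default=0)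
-- ===== Notes on version B (the rewrite author's own statement) =====
-- stated objective: idiomatic
-- what changed: Replaces the char-by-char count/max_count/prev_char state machine with re.findall(r'[yY][oO]+') to enumerate all maximal y-then-o-run segments, then takes max(len(m)-1, default=0) over the matches.
import Mathlib
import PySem

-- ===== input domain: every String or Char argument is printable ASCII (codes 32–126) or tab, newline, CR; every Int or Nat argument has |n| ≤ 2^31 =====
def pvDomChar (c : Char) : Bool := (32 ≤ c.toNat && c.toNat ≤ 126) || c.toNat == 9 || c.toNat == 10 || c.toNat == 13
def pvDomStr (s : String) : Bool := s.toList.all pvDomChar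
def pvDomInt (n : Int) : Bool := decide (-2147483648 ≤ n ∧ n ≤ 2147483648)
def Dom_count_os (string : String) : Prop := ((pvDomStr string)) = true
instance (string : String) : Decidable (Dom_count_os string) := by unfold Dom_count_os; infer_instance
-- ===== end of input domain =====

-- B replaces A's char-by-char count/max_count/prev_char state machine by enumerating the maximal
-- [yY][oO]+ segments (a regex in Python) and taking the maximum o-run length (objective: idiomatic).

-- ===== PORT A =====
-- Python's prev_char is "" initially and a lowered one-char string afterwards: ported as Option Char
-- (none = "", some c = the lowered char); the comparisons prev_char == "y" / "o" become = some 'y' / 'o'.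
def count_os_step (st : Int × Int × Option Char) (char : Char) : Int × Int × Option Char :=
  let count := st.1
  let max_count := st.2.1
  let prev_char := st.2.2
  if prev_char = some 'y' ∧ PySem.Chars.lowerChar char = 'o' then
    (count + 1, max_count, some (PySem.Chars.lowerChar char))
  else if PySem.Chars.lowerChar char = 'o' ∧ prev_char = some 'o' ∧ count > 0 then
    (count + 1, max_count, some (PySem.Chars.lowerChar char))
  else
    (0, if count > max_count then count else max_count, some (PySem.Chars.lowerChar char))

def count_os (string : String) : Int :=
  let st := string.toList.foldl count_os_step (0, 0, none)
  if st.1 > st.2.1 then st.1 else st.2.1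

-- ===== PORT B =====
def isY (c : Char) : Bool := c = 'y' || c = 'Y'
def isO (c : Char) : Bool := c = 'o' || c = 'O'

-- length of the leading run of [oO]
def oRun : List Char → Nat
  | [] => 0
  | c :: rest => if isO c then oRun rest + 1 else 0

-- re.findall(r'[yY][oO]+', s) as the list of MATCH LENGTHS (leftmost, non-overlapping — exact for
-- this pattern: a match is a y/Y followed by the maximal nonempty o/O-run starting right after it)
def findMatches : List Char → List Nat
  | [] => []
  | c :: rest =>
    if isY c then
      let n := oRun rest
      if 0 < n then (n + 1) :: findMatches (rest.drop n) else findMatches rest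
    else findMatches rest
  termination_by l => l.length
  decreasing_by
    all_goals simp [List.length_drop]

-- max((len(m) - 1 for m in matches), default=0)
def count_os_alt (string : String) : Int :=
  (PySem.List.max? ((findMatches string.toList).map (fun m : Nat => (m : Int) - 1)) (fun y => y)).getD 0

-- ===== PRECONDITION & SPEC =====
def Spec_count_os (string : String) (out : Int) : Prop := out = count_os_alt string
instance (string : String) (out : Int) : Decidable (Spec_count_os string out) := by unfold Spec_count_os; infer_instance

-- ===== CLAIM (what is proved, stated in full; the proofs are below) =====
def Claim_equal_count_os : Prop := ∀ (string : String), Dom_count_os string → Spec_count_os string (count_os string)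

-- ===== LEMMAS AND PROOFS =====

lemma char_toNat_inj {c d : Char} (h : c.toNat = d.toNat) : c = d :=
  Char.ext (UInt32.toNat_inj.mp h)

lemma char_le_toNat (c d : Char) : c ≤ d ↔ c.toNat ≤ d.toNat := by
  rw [Char.le_def, UInt32.le_iff_toNat_le]; rfl

lemma lowerChar_eq_iff (c LO HI : Char) (hLO : 65 ≤ LO.toNat) (h90 : LO.toNat ≤ 90)
    (hHI : HI.toNat = LO.toNat + 32) :
    (PySem.Chars.lowerChar c = HI) ↔ (c = HI ∨ c = LO) := by
  have hA : ('A' : Char).toNat = 65 := by decide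
  have hZ : ('Z' : Char).toNat = 90 := by decide
  simp only [PySem.Chars.lowerChar, PySem.Chars.isupper, Bool.and_eq_true, decide_eq_true_eq]
  split_ifs with h
  · obtain ⟨h1, h2⟩ := h
    rw [char_le_toNat, hA] at h1
    rw [char_le_toNat, hZ] at h2
    have hv : (c.toNat + 32).isValidChar := Or.inl (by omega)
    have key : (Char.ofNat (c.toNat + 32)).toNat = c.toNat + 32 := by
      simp [Char.ofNat, hv, Char.ofNatAux]
      omega
    constructor
    · intro he
      have := congrArg Char.toNat he
      rw [key] at this
      exact Or.inr (char_toNat_inj (by omega))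
    · rintro (rfl | rfl)
      · omega
      · exact char_toNat_inj (by omega)
  · constructor
    · intro he; exact Or.inl he
    · rintro (rfl | rfl)
      · rfl
      · exfalso
        exact h ⟨(char_le_toNat _ _).mpr (by omega), (char_le_toNat _ _).mpr (by omega)⟩

lemma lower_o_iff (c : Char) : PySem.Chars.lowerChar c = 'o' ↔ isO c = true := by
  rw [lowerChar_eq_iff c 'O' 'o' (by decide) (by decide) (by decide)]
  simp [isO, or_comm]

lemma lower_y_iff (c : Char) : PySem.Chars.lowerChar c = 'y' ↔ isY c = true := by
  rw [lowerChar_eq_iff c 'Y' 'y' (by decide) (by decide) (by decide)]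
  simp [isY, or_comm]

lemma findMatches_nil : findMatches [] = [] := by
  rw [findMatches.eq_def]

lemma findMatches_cons_y_pos (c : Char) (t : List Char) (h : isY c = true) (hn : 0 < oRun t) :
    findMatches (c :: t) = (oRun t + 1) :: findMatches (t.drop (oRun t)) := by
  rw [findMatches.eq_def]
  simp [h, hn]

lemma findMatches_cons_y_zero (c : Char) (t : List Char) (h : isY c = true) (hn : oRun t = 0) :
    findMatches (c :: t) = findMatches t := by
  rw [findMatches.eq_def]
  simp [h, hn]

lemma findMatches_cons_notY (c : Char) (t : List Char) (h : isY c = false) :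
    findMatches (c :: t) = findMatches t := by
  rw [findMatches.eq_def]
  simp [h]

-- B's value as a plain running-max fold (max? with identity key is the running-max loop)
def G (l : List Char) : Int := ((findMatches l).map (fun m : Nat => (m : Int) - 1)).foldl max 0

lemma foldl_max_shift (xs : List Int) (a b : Int) :
    xs.foldl max (max a b) = max a (xs.foldl max b) := by
  induction xs generalizing b with
  | nil => rfl
  | cons x t ih =>
    simp only [List.foldl_cons, max_assoc, ih]

lemma init_le_foldl_max (xs : List Int) (b : Int) : b ≤ xs.foldl max b := by
  induction xs generalizing b with
  | nil => simp
  | cons x t ih =>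
    simp only [List.foldl_cons]
    exact le_trans (le_max_left b x) (ih (max b x))

lemma G_nonneg (l : List Char) : 0 ≤ G l := init_le_foldl_max _ _

lemma findMatches_two_le (l : List Char) : ∀ m ∈ findMatches l, 2 ≤ m := by
  fun_induction findMatches l with
  | case1 => simp
  | case2 c rest h n hn ih =>
    intro m hm
    rcases List.mem_cons.mp hm with rfl | hm
    · omega
    · exact ih m hm
  | case3 c rest h n hn ih => exact ih
  | case4 c rest h ih => exact ih

lemma alt_eq_G (s : String) : count_os_alt s = G s.toList := by
  unfold count_os_alt G
  cases hfm : findMatches s.toList with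
  | nil => simp [PySem.List.max?]
  | cons m ms =>
    have h2 : 2 ≤ m := findMatches_two_le s.toList m (by rw [hfm]; exact List.mem_cons_self)
    simp only [List.map_cons, PySem.List.max?_id_cons, Option.getD_some, List.foldl_cons]
    have hge : (0 : Int) ≤ (m : Int) - 1 := by omega
    rw [max_eq_right hge]

-- value of B as if a y was just consumed and l is the rest of the string
def yv (l : List Char) : Int :=
  if 0 < oRun l then max (oRun l : Int) (G (l.drop (oRun l))) else G l

lemma yv_nonneg (l : List Char) : 0 ≤ yv l := by
  unfold yv; split_ifs with h
  · exact le_max_of_le_right (G_nonneg _)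
  · exact G_nonneg _

lemma G_cons_y (c : Char) (t : List Char) (h : isY c = true) : G (c :: t) = yv t := by
  unfold G yv
  by_cases hn : 0 < oRun t
  · rw [findMatches_cons_y_pos c t h hn, if_pos hn]
    simp only [List.map_cons, List.foldl_cons]
    have : max 0 ((↑(oRun t + 1) : Int) - 1) = max ((oRun t : Int)) 0 := by
      push_cast; rw [max_comm]; congr 1; ring
    rw [this, foldl_max_shift]
    rfl
  · rw [findMatches_cons_y_zero c t h (by omega), if_neg hn]
    rfl

lemma G_cons_notY (c : Char) (t : List Char) (h : isY c = false) : G (c :: t) = G t := by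
  unfold G
  rw [findMatches_cons_notY c t h]

lemma max_absorb (m x : Int) (hx : 0 ≤ x) : max (max m 0) x = max m x := by
  rcases le_total m 0 with h | h <;> simp [max_def] <;> omega

-- the invariant of A's loop, in the three reachable shapes of its state
lemma main_inv (l : List Char) :
    (∀ (m : Int) (p : Option Char), p ≠ some 'y' →
      (fun st : Int × Int × Option Char => if st.1 > st.2.1 then st.1 else st.2.1)
        (l.foldl count_os_step (0, m, p)) = max m (G l))
    ∧ (∀ (m : Int),
      (fun st : Int × Int × Option Char => if st.1 > st.2.1 then st.1 else st.2.1)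
        (l.foldl count_os_step (0, m, some 'y')) = max m (yv l))
    ∧ (∀ (m k : Int), 0 < k →
      (fun st : Int × Int × Option Char => if st.1 > st.2.1 then st.1 else st.2.1)
        (l.foldl count_os_step (k, m, some 'o')) = max m (max (k + (oRun l : Int)) (G (l.drop (oRun l))))) := by
  induction l with
  | nil =>
    have hG : G [] = 0 := by simp [G, findMatches_nil]
    refine ⟨?_, ?_, ?_⟩
    · intro m p _
      simp only [List.foldl_nil, hG]
      simp [max_def]; omega
    · intro m
      have : yv [] = 0 := by simp [yv, oRun, hG]
      simp only [List.foldl_nil, this]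
      simp [max_def]; omega
    · intro m k hk
      simp only [List.foldl_nil, oRun, List.drop_nil, hG]
      simp [max_def]; omega
  | cons c t ih =>
    obtain ⟨ih1, ih2, ih3⟩ := ih
    by_cases ho : PySem.Chars.lowerChar c = 'o'
    · -- c is o/O
      have hO : isO c = true := (lower_o_iff c).mp ho
      have hYf : isY c = false := by
        rcases (by simpa [isO] using hO : c = 'o' ∨ c = 'O') with rfl | rfl <;> decide
      have hyne : PySem.Chars.lowerChar c ≠ 'y' := by rw [ho]; decide
      refine ⟨?_, ?_, ?_⟩
      · intro m p hp
        rw [List.foldl_cons]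
        have : count_os_step (0, m, p) c = (0, max m 0, some 'o') := by
          simp [count_os_step, hp, ho, max_def]; omega
        rw [this, ih1 (max m 0) (some 'o') (by decide)]
        rw [G_cons_notY c t hYf]
        exact max_absorb m (G t) (G_nonneg t)
      · intro m
        rw [List.foldl_cons]
        have : count_os_step (0, m, some 'y') c = (1, m, some 'o') := by
          simp [count_os_step, ho]
        rw [this, ih3 m 1 one_pos]
        have hrun : oRun (c :: t) = oRun t + 1 := by simp [oRun, hO]
        have hyv : yv (c :: t) = max ((oRun t : Int) + 1) (G (t.drop (oRun t))) := by
          unfold yv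
          rw [hrun, if_pos (by omega)]
          simp only [List.drop_succ_cons]
          push_cast; ring_nf
        rw [hyv]
        congr 2
        ring
      · intro m k hk
        rw [List.foldl_cons]
        have : count_os_step (k, m, some 'o') c = (k + 1, m, some 'o') := by
          simp [count_os_step, ho, hk]
        rw [this, ih3 m (k + 1) (by omega)]
        have hrun : oRun (c :: t) = oRun t + 1 := by simp [oRun, hO]
        rw [hrun]
        simp only [List.drop_succ_cons]
        congr 2
        push_cast; ring
    · -- c is not o/O: the else branch fires in every state
      have hOf : isO c = false := by
        by_contra h
        exact ho ((lower_o_iff c).mpr (by simpa using h))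
      have hrun : oRun (c :: t) = 0 := by simp [oRun, hOf]
      by_cases hy : PySem.Chars.lowerChar c = 'y'
      · -- c is y/Y
        have hY : isY c = true := (lower_y_iff c).mp hy
        have step : ∀ (cnt m : Int) (p : Option Char),
            count_os_step (cnt, m, p) c = (0, if cnt > m then cnt else m, some 'y') := by
          intro cnt m p
          simp [count_os_step, hy]
        refine ⟨?_, ?_, ?_⟩
        · intro m p _
          rw [List.foldl_cons, step, ih2]
          rw [G_cons_y c t hY]
          have : (if (0:Int) > m then (0:Int) else m) = max m 0 := by simp [max_def]; omega
          rw [this]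
          exact max_absorb m (yv t) (yv_nonneg t)
        · intro m
          rw [List.foldl_cons, step, ih2]
          have hyv : yv (c :: t) = G (c :: t) := by unfold yv; rw [hrun]; simp
          rw [hyv, G_cons_y c t hY]
          have : (if (0:Int) > m then (0:Int) else m) = max m 0 := by simp [max_def]; omega
          rw [this]
          exact max_absorb m (yv t) (yv_nonneg t)
        · intro m k hk
          rw [List.foldl_cons, step, ih2]
          rw [hrun]
          simp only [List.drop_zero, Nat.cast_zero, add_zero]
          rw [G_cons_y c t hY]
          have : (if k > m then k else m) = max m k := by simp [max_def]; omega
          rw [this, max_assoc]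
      · -- c is neither
        have hYf : isY c = false := by
          by_contra h
          exact hy ((lower_y_iff c).mpr (by simpa using h))
        have hne : some (PySem.Chars.lowerChar c) ≠ some 'y' := by
          simpa using hy
        have step : ∀ (cnt m : Int) (p : Option Char),
            count_os_step (cnt, m, p) c = (0, if cnt > m then cnt else m, some (PySem.Chars.lowerChar c)) := by
          intro cnt m p
          simp [count_os_step, ho]
        refine ⟨?_, ?_, ?_⟩
        · intro m p _
          rw [List.foldl_cons, step, ih1 _ _ hne]
          rw [G_cons_notY c t hYf]
          have : (if (0:Int) > m then (0:Int) else m) = max m 0 := by simp [max_def]; omega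
          rw [this]
          exact max_absorb m (G t) (G_nonneg t)
        · intro m
          rw [List.foldl_cons, step, ih1 _ _ hne]
          have hyv : yv (c :: t) = G (c :: t) := by unfold yv; rw [hrun]; simp
          rw [hyv, G_cons_notY c t hYf]
          have : (if (0:Int) > m then (0:Int) else m) = max m 0 := by simp [max_def]; omega
          rw [this]
          exact max_absorb m (G t) (G_nonneg t)
        · intro m k hk
          rw [List.foldl_cons, step, ih1 _ _ hne]
          rw [hrun]
          simp only [List.drop_zero, Nat.cast_zero, add_zero]
          rw [G_cons_notY c t hYf]
          have : (if k > m then k else m) = max m k := by simp [max_def]; omega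
          rw [this, max_assoc]

-- ===== VERDICT (by name: the statement is the Claim_ definition above) =====
theorem count_os_spec : Claim_equal_count_os := by
  intro s _
  unfold Spec_count_os count_os
  rw [alt_eq_G]
  have h := (main_inv s.toList).1 0 none (by decide)
  simp only at h
  rw [h, max_eq_right (G_nonneg _)]
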